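-- pv_equiv track=rewrite | github.com/awm-hbeatson/cart-learning | src/ProductMapper.py | sort_class_info
-- ===== SOURCE A (Python) =====
-- def sort_class_info(class_info:list) -> list:
--     '''
--     Re-organize class info once it has been mapped by dataMapping()
--     '''
--     for (gondola_id, shelf_id) in class_info:
--         products = class_info[(gondola_id, shelf_id)]
--         x_hash = dict()
--         for i,product in enumerate(products):
--             x_hash[product['X']] = i
--         new_products = []
--         sorted_x = sorted(x_hash.keys())
--         for x in sorted_x:
--             new_products.append(products[x_hash[x]])
--         class_info[(gondola_id, shelf_id)] = new_products
--     return class_info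
-- ===== SOURCE B (Python) =====
-- def sort_class_info(class_info: list) -> list:
--     '''
--     Stable-sort each shelf's products by X, then collapse equal-X runs
--     keeping the LAST product of each run (stability makes this equal to
--     A's last-index-wins dict rule). Returns a new dict (A mutates in place).
--     '''
--     result = {}
--     for key, products in class_info.items():
--         collapsed = []
--         for p in sorted(products, key=lambda q: q['X']):
--             if collapsed and collapsed[-1]['X'] == p['X']:
--                 collapsed.pop()
--             collapsed.append(p)
--         result[key] = collapsed
--     return result
-- ===== Notes on version B (the rewrite author's own statement) =====
-- stated objective: simpler
-- what changed: Instead of building an X->last-index dict, sorting its keys and re-indexing the products list, B stably sorts each shelf's products by X once and collapses each run of equal X keeping the run's last product (stability makes that A's last-index-wins rule); Pre_ excludes products missing the key 'X' (A raises KeyError) and association lists with duplicate dict keys, which do not denote a Python dict.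
import Mathlib
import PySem

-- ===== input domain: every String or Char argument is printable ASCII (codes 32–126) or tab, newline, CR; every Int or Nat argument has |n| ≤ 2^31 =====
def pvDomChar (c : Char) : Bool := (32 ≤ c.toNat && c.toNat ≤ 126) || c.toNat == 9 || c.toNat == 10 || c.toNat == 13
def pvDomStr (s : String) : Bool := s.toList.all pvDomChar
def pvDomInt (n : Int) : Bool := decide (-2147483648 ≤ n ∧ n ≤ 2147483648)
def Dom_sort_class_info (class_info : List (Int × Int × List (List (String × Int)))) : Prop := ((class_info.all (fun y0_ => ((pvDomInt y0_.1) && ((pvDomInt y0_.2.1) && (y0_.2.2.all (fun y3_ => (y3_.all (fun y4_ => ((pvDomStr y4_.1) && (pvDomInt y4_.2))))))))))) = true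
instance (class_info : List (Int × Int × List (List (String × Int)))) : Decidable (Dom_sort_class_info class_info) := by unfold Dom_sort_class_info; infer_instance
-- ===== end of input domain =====

-- B re-sorts each shelf by a stable sort and collapses equal-X runs keeping the last
-- product (simpler: no index dict / rebuild pass).  A mutates its dict argument in
-- place and returns it; B builds a fresh dict — the claim is about the RETURN value.

-- shared helper of both ports: product['X']  (exact under Pre_: every product carries the key "X")
def pvProdX (p : List (String × Int)) : Int := (PySem.Dict.mk p).getD "X" 0

-- ===== PORT A =====

-- the inner  'for i,product in enumerate(products): x_hash[product['X']] = i'  loop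
def pvProdXhash (products : List (List (String × Int))) : PySem.Dict Int Int :=
  (PySem.List.enumerate products).foldl (fun d ip => d.insert (pvProdX ip.2) ip.1) PySem.Dict.empty

-- one shelf:  x_hash, sorted_x, and the append loop building new_products
def pvAShelf (products : List (List (String × Int))) : List (List (String × Int)) :=
  let xh := pvProdXhash products
  let sorted_x := PySem.List.sorted xh.keys (fun x => x) false
  sorted_x.foldl (fun np x => np ++ [PySem.List.pyGetD products (xh.getD x 0) []]) []

-- class_info[(gondola_id, shelf_id)]  — dict lookup, first match ([] unreachable: keys come from the dict itself)
def pvALookup (st : List (Int × Int × List (List (String × Int)))) (k : Int × Int) :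
    List (List (String × Int)) :=
  match st with
  | [] => []
  | t :: rest => if (t.1, t.2.1) = k then t.2.2 else pvALookup rest k

-- class_info[(gondola_id, shelf_id)] = new_products  — overwrite in place
def pvAAssign (st : List (Int × Int × List (List (String × Int)))) (k : Int × Int)
    (v : List (List (String × Int))) : List (Int × Int × List (List (String × Int))) :=
  match st with
  | [] => []
  | t :: rest => if (t.1, t.2.1) = k then (t.1, t.2.1, v) :: rest else t :: pvAAssign rest k v

def sort_class_info (class_info : List (Int × Int × List (List (String × Int)))) :
    List (Int × Int × List (List (String × Int))) :=
  (class_info.map (fun t => (t.1, t.2.1))).foldl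
    (fun st k => pvAAssign st k (pvAShelf (pvALookup st k))) class_info

-- ===== PORT B =====
-- 'for p in srt: if collapsed and collapsed[-1]['X'] == p['X']: collapsed.pop(); collapsed.append(p)'
-- (collapsed.pop() on a nonempty list drops its last element: List.dropLast)
def pvBCollapse (srt : List (List (String × Int))) : List (List (String × Int)) :=
  srt.foldl
    (fun out p =>
      (if out ≠ [] ∧ pvProdX (PySem.List.pyGetD out (-1) []) = pvProdX p then out.dropLast else out) ++ [p])
    []

def pvBShelf (products : List (List (String × Int))) : List (List (String × Int)) :=
  pvBCollapse (PySem.List.sorted products pvProdX false)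

def sort_class_info_alt (class_info : List (Int × Int × List (List (String × Int)))) :
    List (Int × Int × List (List (String × Int))) :=
  class_info.map (fun t => (t.1, t.2.1, pvBShelf t.2.2))

-- ===== PRECONDITION & SPEC =====
-- Pre_ excludes (a) products missing the key "X", on which Python A raises KeyError, and
-- (b) association lists with duplicate (gondola,shelf) keys or duplicate keys inside a
-- product — those do not denote a Python dict (dict construction silently collapses them).
def Pre_sort_class_info (class_info : List (Int × Int × List (List (String × Int)))) : Prop :=
  (class_info.map (fun t => (t.1, t.2.1))).Nodup ∧
  ∀ t ∈ class_info, ∀ p ∈ t.2.2, (p.map Prod.fst).Nodup ∧ "X" ∈ p.map Prod.fst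
instance (class_info : List (Int × Int × List (List (String × Int)))) : Decidable (Pre_sort_class_info class_info) := by unfold Pre_sort_class_info; infer_instance

def pvWitness_sort_class_info : (List (Int × Int × List (List (String × Int)))) :=
  [(1, 2, [[("X", 5)], [("X", 3), ("y", 7)], [("X", 5), ("y", 1)]]), (1, 3, [])]

def Spec_sort_class_info (class_info : List (Int × Int × List (List (String × Int)))) (out : List (Int × Int × List (List (String × Int)))) : Prop := out = sort_class_info_alt class_info
instance (class_info : List (Int × Int × List (List (String × Int)))) (out : List (Int × Int × List (List (String × Int)))) : Decidable (Spec_sort_class_info class_info out) := by unfold Spec_sort_class_info; infer_instance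

-- ===== CLAIM (what is proved, stated in full; the proofs are below) =====
def Claim_equal_sort_class_info : Prop := ∀ (class_info : List (Int × Int × List (List (String × Int)))), Dom_sort_class_info class_info → Pre_sort_class_info class_info → Spec_sort_class_info class_info (sort_class_info class_info)

-- ===== LEMMAS AND PROOFS =====

-- last product of ps whose X equals x (the canonical per-key value both sides compute)
def pvLastD (x : Int) (ps : List (List (String × Int))) : List (String × Int) :=
  ((ps.filter (fun p => pvProdX p = x)).getLast?).getD []

-- canonical per-shelf result
def pvCanon (ps : List (List (String × Int))) : List (List (String × Int)) :=
  (PySem.List.sorted (PySem.Set.ofList (ps.map pvProdX)) (fun x => x) false).map (fun x => pvLastD x ps)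

def pvCF (p : List (String × Int)) : List (List (String × Int)) → List (List (String × Int))
  | [] => [p]
  | q :: rest => if pvProdX p = pvProdX q then pvCF q rest else p :: pvCF q rest

def pvC (l : List (List (String × Int))) : List (List (String × Int)) :=
  match l with
  | [] => []
  | p :: rest => pvCF p rest

theorem pvCF_acc (l : List (List (String × Int))) :
    ∀ (ys : List (List (String × Int))) (p : List (String × Int)),
    l.foldl (fun out p =>
      (if out ≠ [] ∧ pvProdX (PySem.List.pyGetD out (-1) []) = pvProdX p then out.dropLast else out) ++ [p])
      (ys ++ [p]) = ys ++ pvCF p l := by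
  induction l with
  | nil => intro ys p; simp [pvCF]
  | cons q rest ih =>
    intro ys p
    simp only [List.foldl_cons, pvCF]
    rw [PySem.List.pyGetD_neg_one_append_singleton]
    by_cases h : pvProdX p = pvProdX q
    · rw [if_pos ⟨by simp, h⟩, List.dropLast_concat, ih ys q, if_pos h]
    · rw [if_neg (fun hc => h hc.2), if_neg h]
      simpa using ih (ys ++ [p]) q

theorem pvBCollapse_eq_pvC (l : List (List (String × Int))) : pvBCollapse l = pvC l := by
  cases l with
  | nil => rfl
  | cons p rest =>
    unfold pvBCollapse pvC
    rw [List.foldl_cons, if_neg (fun hc => hc.1 rfl)]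
    exact pvCF_acc rest [] p
theorem pvCF_mem (p : List (String × Int)) (l : List (List (String × Int))) :
    ∀ r ∈ pvCF p l, r = p ∨ r ∈ l := by
  induction l generalizing p with
  | nil => simp [pvCF]
  | cons q rest ih =>
    intro r hr
    rw [pvCF] at hr
    by_cases h : pvProdX p = pvProdX q
    · rw [if_pos h] at hr
      rcases ih q r hr with h1 | h1
      · exact Or.inr (h1 ▸ List.mem_cons_self)
      · exact Or.inr (List.mem_cons_of_mem _ h1)
    · rw [if_neg h, List.mem_cons] at hr
      rcases hr with h1 | h1
      · exact Or.inl h1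
      · rcases ih q r h1 with h2 | h2
        · exact Or.inr (h2 ▸ List.mem_cons_self)
        · exact Or.inr (List.mem_cons_of_mem _ h2)

theorem mem_map_pvCF (p : List (String × Int)) (l : List (List (String × Int))) (x : Int) :
    x ∈ (pvCF p l).map pvProdX ↔ x ∈ (p :: l).map pvProdX := by
  induction l generalizing p with
  | nil => simp [pvCF]
  | cons q rest ih =>
    rw [pvCF]
    by_cases h : pvProdX p = pvProdX q
    · rw [if_pos h, ih q]
      simp [h]
    · rw [if_neg h]
      simp only [List.map_cons, List.mem_cons] at ih ⊢
      rw [ih q]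
theorem pvGetLast?_cons_ne_nil {α : Type} (a : α) {m : List α} (h : m ≠ []) :
    (a :: m).getLast? = m.getLast? := by
  cases m with
  | nil => exact absurd rfl h
  | cons b l => exact List.getLast?_cons_cons

theorem pvCF_pairwise (l : List (List (String × Int))) :
    ∀ p, ((p :: l).Pairwise (fun a b => pvProdX a ≤ pvProdX b)) →
      (pvCF p l).Pairwise (fun a b => pvProdX a < pvProdX b) := by
  induction l with
  | nil => intro p _; simp [pvCF]
  | cons q rest ih =>
    intro p h
    rw [List.pairwise_cons] at h
    rw [pvCF]
    by_cases hpq : pvProdX p = pvProdX q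
    · rw [if_pos hpq]; exact ih q h.2
    · rw [if_neg hpq]
      rw [List.pairwise_cons]
      refine ⟨?_, ih q h.2⟩
      intro r hr
      have hpq' : pvProdX p < pvProdX q := lt_of_le_of_ne (h.1 q (by simp)) hpq
      rcases pvCF_mem q rest r hr with h1 | h1
      · rw [h1]; exact hpq'
      · have : pvProdX q ≤ pvProdX r := (List.rel_of_pairwise_cons h.2) h1
        exact lt_of_lt_of_le hpq' this

theorem pvCF_last (l : List (List (String × Int))) :
    ∀ p, ((p :: l).Pairwise (fun a b => pvProdX a ≤ pvProdX b)) →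
      ∀ r ∈ pvCF p l, pvLastD (pvProdX r) (p :: l) = r := by
  induction l with
  | nil =>
    intro p _ r hr
    rw [pvCF] at hr
    simp only [List.mem_singleton] at hr
    subst hr
    simp [pvLastD]
  | cons q rest ih =>
    intro p h r hr
    rw [List.pairwise_cons] at h
    rw [pvCF] at hr
    by_cases hpq : pvProdX p = pvProdX q
    · rw [if_pos hpq] at hr
      have ihr := ih q h.2 r hr
      unfold pvLastD at ihr ⊢
      rw [List.filter_cons]
      by_cases hpr : pvProdX p = pvProdX r
      · rw [if_pos (by simpa using hpr)]
        have hq : (q :: rest).filter (fun p' => decide (pvProdX p' = pvProdX r)) ≠ [] :=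
          List.ne_nil_of_mem (List.mem_filter.mpr ⟨List.mem_cons_self, by simp [hpq.symm.trans hpr]⟩)
        rw [pvGetLast?_cons_ne_nil _ hq]
        exact ihr
      · rw [if_neg (by simpa using hpr)]
        exact ihr
    · rw [if_neg hpq] at hr
      have hpq' : pvProdX p < pvProdX q := lt_of_le_of_ne (h.1 q (by simp)) hpq
      rcases List.mem_cons.mp hr with h1 | h1
      · subst h1
        unfold pvLastD
        have hnil : (q :: rest).filter (fun p' => decide (pvProdX p' = pvProdX r)) = [] := by
          rw [List.filter_eq_nil_iff]
          intro a ha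
          have : pvProdX r < pvProdX a := by
            rcases List.mem_cons.mp ha with h2 | h2
            · rw [h2]; exact hpq'
            · exact lt_of_lt_of_le hpq' ((List.rel_of_pairwise_cons h.2) h2)
          simp [ne_of_gt this]
        rw [List.filter_cons, if_pos (by simp), hnil]
        rfl
      · have hqr : pvProdX q ≤ pvProdX r := by
          rcases pvCF_mem q rest r h1 with h2 | h2
          · rw [h2]
          · exact (List.rel_of_pairwise_cons h.2) h2
        have hpr : pvProdX p ≠ pvProdX r := ne_of_lt (lt_of_lt_of_le hpq' hqr)
        have ihr := ih q h.2 r h1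
        unfold pvLastD at ihr ⊢
        rw [List.filter_cons, if_neg (by simpa using hpr)]
        exact ihr
theorem pvInsertBy_filter (x : Int) (p : List (String × Int)) (l : List (List (String × Int)))
    (h : l.Pairwise (fun a b => pvProdX a ≤ pvProdX b)) :
    (PySem.List.insertBy (fun a b => decide (pvProdX a < pvProdX b)) p l).filter
        (fun q => decide (pvProdX q = x))
      = l.filter (fun q => decide (pvProdX q = x)) ++ (if pvProdX p = x then [p] else []) := by
  induction l with
  | nil => simp [PySem.List.insertBy, List.filter]; split <;> simp_all
  | cons y ys ih =>
    rw [List.pairwise_cons] at h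
    show (if decide (pvProdX p < pvProdX y) = true then p :: y :: ys
          else y :: PySem.List.insertBy _ p ys).filter _ = _
    by_cases hlt : pvProdX p < pvProdX y
    · rw [if_pos (by simpa using hlt)]
      by_cases hx : pvProdX p = x
      · have hnil : (y :: ys).filter (fun q => decide (pvProdX q = x)) = [] := by
          rw [List.filter_eq_nil_iff]
          intro a ha
          have : pvProdX p < pvProdX a := by
            rcases List.mem_cons.mp ha with h2 | h2
            · rw [h2]; exact hlt
            · exact lt_of_lt_of_le hlt (h.1 a h2)
          simp [hx ▸ (ne_of_gt this)]
        rw [List.filter_cons, if_pos (by simpa using hx), hnil, if_pos hx]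
        rfl
      · rw [List.filter_cons, if_neg (by simpa using hx), if_neg hx, List.append_nil]
    · rw [if_neg (by simpa using hlt)]
      rw [List.filter_cons, List.filter_cons, ih h.2]
      split <;> simp

theorem pvSorted_filter (ps : List (List (String × Int))) (x : Int) :
    (PySem.List.sorted ps pvProdX false).filter (fun q => decide (pvProdX q = x))
      = ps.filter (fun q => decide (pvProdX q = x)) := by
  induction ps using List.reverseRecOn with
  | nil => rfl
  | append_singleton ps p ih =>
    rw [PySem.List.sorted_eq_foldl_insertBy, List.foldl_append, ← PySem.List.sorted_eq_foldl_insertBy]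
    show (PySem.List.insertBy _ p _).filter _ = _
    rw [pvInsertBy_filter x p _ (PySem.List.sorted_pairwise ps pvProdX), ih, List.filter_append]
    congr 1
    simp [List.filter]
    split <;> simp_all
theorem pvC_pairwise (l : List (List (String × Int)))
    (h : l.Pairwise (fun a b => pvProdX a ≤ pvProdX b)) :
    (pvC l).Pairwise (fun a b => pvProdX a < pvProdX b) := by
  cases l with
  | nil => exact List.Pairwise.nil
  | cons p rest => exact pvCF_pairwise rest p h

theorem mem_map_pvC (l : List (List (String × Int))) (x : Int) :
    x ∈ (pvC l).map pvProdX ↔ x ∈ l.map pvProdX := by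
  cases l with
  | nil => exact Iff.rfl
  | cons p rest => exact mem_map_pvCF p rest x

theorem pvC_last (l : List (List (String × Int)))
    (h : l.Pairwise (fun a b => pvProdX a ≤ pvProdX b)) :
    ∀ r ∈ pvC l, pvLastD (pvProdX r) l = r := by
  cases l with
  | nil => intro r hr; exact absurd hr (List.not_mem_nil)
  | cons p rest => exact pvCF_last rest p h

theorem pvBShelf_eq_canon (ps : List (List (String × Int))) : pvBShelf ps = pvCanon ps := by
  have hS : pvBShelf ps = pvC (PySem.List.sorted ps pvProdX false) :=
    pvBCollapse_eq_pvC (PySem.List.sorted ps pvProdX false)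
  set S := PySem.List.sorted ps pvProdX false with hSdef
  have SP : S.Pairwise (fun a b => pvProdX a ≤ pvProdX b) := PySem.List.sorted_pairwise ps pvProdX
  have hpw : ((pvC S).map pvProdX).Pairwise (· < ·) := by
    rw [List.pairwise_map]
    exact pvC_pairwise S SP
  have hks : PySem.List.sorted (PySem.Set.ofList (ps.map pvProdX)) (fun x => x) false
      = (pvC S).map pvProdX := by
    apply PySem.List.sorted_eq_of_perm_of_pairwise_lt
    · rw [List.perm_ext_iff_of_nodup (List.Pairwise.imp ne_of_lt hpw) (PySem.Set.nodup_ofList _)]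
      intro x
      rw [mem_map_pvC, PySem.Set.mem_ofList]
      constructor
      · intro hx
        rcases List.mem_map.mp hx with ⟨r, hr, hrx⟩
        exact List.mem_map.mpr ⟨r, (PySem.List.mem_sorted ps pvProdX false r).mp hr, hrx⟩
      · intro hx
        rcases List.mem_map.mp hx with ⟨r, hr, hrx⟩
        exact List.mem_map.mpr ⟨r, (PySem.List.mem_sorted ps pvProdX false r).mpr hr, hrx⟩
    · exact hpw
  unfold pvCanon
  rw [hks, hS, List.map_map]
  have hmap : (pvC S).map ((fun x => pvLastD x ps) ∘ pvProdX) = (pvC S).map id := by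
    refine List.map_congr_left fun r hr => ?_
    have hfilter : pvLastD (pvProdX r) ps = pvLastD (pvProdX r) S := by
      unfold pvLastD
      rw [pvSorted_filter ps (pvProdX r)]
    exact hfilter.trans (pvC_last S SP r hr)
  rw [hmap, List.map_id]
theorem pvProdXhash_keys (ps : List (List (String × Int))) :
    (pvProdXhash ps).keys = PySem.Set.ofList (ps.map pvProdX) := by
  unfold pvProdXhash
  have hk := PySem.Dict.keys_foldl_insert_key (ν := Int) (PySem.List.enumerate ps)
    (fun ip => pvProdX ip.2) (fun d ip => ip.1) PySem.Dict.empty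
  rw [hk]
  have : (PySem.List.enumerate ps).map (fun ip => pvProdX ip.2)
      = ((PySem.List.enumerate ps).map (·.2)).map pvProdX := by rw [List.map_map]; rfl
  rw [show (PySem.Dict.empty : PySem.Dict Int Int).keys = [] from rfl, this,
    PySem.List.map_snd_enumerate, PySem.Set.update_nil_left]

theorem pvProdXhash_append (ps : List (List (String × Int))) (p : List (String × Int)) :
    pvProdXhash (ps ++ [p]) = (pvProdXhash ps).insert (pvProdX p) ((ps.length : Int)) := by
  unfold pvProdXhash
  rw [PySem.List.enumerate_append, List.foldl_append]
  simp [PySem.List.enumerate_cons]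

theorem pvProdXhash_spec (ps : List (List (String × Int))) (x : Int) (hx : x ∈ ps.map pvProdX) :
    ∃ n : Nat, (pvProdXhash ps).get? x = some (n : Int) ∧ n < ps.length ∧
      ps[n]? = some (pvLastD x ps) := by
  induction ps using List.reverseRecOn with
  | nil => simp at hx
  | append_singleton ps p ih =>
    rw [pvProdXhash_append]
    by_cases hp : x = pvProdX p
    · refine ⟨ps.length, ?_, by simp, ?_⟩
      · rw [hp, PySem.Dict.get?_insert_self]
      · rw [List.getElem?_concat_length]
        unfold pvLastD
        rw [List.filter_append]
        have : [p].filter (fun q => decide (pvProdX q = x)) = [p] := by simp [hp]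
        rw [this, List.getLast?_concat]
        rfl
    · have hx' : x ∈ ps.map pvProdX := by
        have hx2 : x ∈ ps.map pvProdX ++ [pvProdX p] := by simpa using hx
        rcases List.mem_append.mp hx2 with h1 | h1
        · exact h1
        · exact absurd (by simpa using h1) hp
      rcases ih hx' with ⟨n, hget, hlt, hval⟩
      refine ⟨n, ?_, by simp; omega, ?_⟩
      · rw [PySem.Dict.get?_insert_of_ne _ _ hp, hget]
      · rw [List.getElem?_append_left hlt, hval]
        unfold pvLastD
        rw [List.filter_append]
        have : [p].filter (fun q => decide (pvProdX q = x)) = [] := by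
          have : decide (pvProdX p = x) = false := by
            simp only [decide_eq_false_iff_not]
            exact fun hh => hp hh.symm
          simp [List.filter, this]
        rw [this, List.append_nil]

theorem pvAShelf_eq_canon (ps : List (List (String × Int))) : pvAShelf ps = pvCanon ps := by
  unfold pvAShelf pvCanon
  rw [PySem.List.foldl_append_singleton_eq_map, pvProdXhash_keys]
  refine List.map_congr_left fun x hxs => ?_
  have hx : x ∈ ps.map pvProdX := by
    simpa [PySem.Set.mem_ofList] using (PySem.List.mem_sorted _ _ _ x).mp hxs
  rcases pvProdXhash_spec ps x hx with ⟨n, hget, hlt, hval⟩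
  rw [PySem.Dict.getD_eq_get?_getD, hget]
  show PySem.List.pyGetD ps ((n : Int)) [] = pvLastD x ps
  rw [PySem.List.pyGetD_natCast, List.getD_eq_getElem?_getD, hval]
  rfl
theorem pvFoldSkip (ks : List (Int × Int)) :
    ∀ (t : Int × Int × List (List (String × Int)))
      (st : List (Int × Int × List (List (String × Int)))),
    (∀ k ∈ ks, k ≠ (t.1, t.2.1)) →
    ks.foldl (fun st k => pvAAssign st k (pvAShelf (pvALookup st k))) (t :: st)
      = t :: ks.foldl (fun st k => pvAAssign st k (pvAShelf (pvALookup st k))) st := by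
  induction ks with
  | nil => intro t st _; rfl
  | cons k ks ih =>
    intro t st h
    have hk : (t.1, t.2.1) ≠ k := fun hh => (h k (by simp)) hh.symm
    rw [List.foldl_cons, List.foldl_cons]
    have hl : pvALookup (t :: st) k = pvALookup st k := by
      rw [pvALookup, if_neg hk]
    have ha : ∀ v, pvAAssign (t :: st) k v = t :: pvAAssign st k v := by
      intro v; rw [pvAAssign, if_neg hk]
    rw [hl, ha]
    exact ih t _ (fun k' hk' => h k' (by simp [hk']))

theorem pvOuter (ci : List (Int × Int × List (List (String × Int))))
    (h : (ci.map (fun t => (t.1, t.2.1))).Nodup) :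
    sort_class_info ci = ci.map (fun t => (t.1, t.2.1, pvAShelf t.2.2)) := by
  unfold sort_class_info
  induction ci with
  | nil => rfl
  | cons t rest ih =>
    rw [List.map_cons] at h
    rcases List.nodup_cons.mp h with ⟨hnm, htail⟩
    rw [List.map_cons, List.foldl_cons]
    have hstep : pvAAssign (t :: rest) (t.1, t.2.1) (pvAShelf (pvALookup (t :: rest) (t.1, t.2.1)))
        = (t.1, t.2.1, pvAShelf t.2.2) :: rest := by
      rw [pvALookup, if_pos rfl, pvAAssign, if_pos rfl]
    rw [hstep]
    have hne : ∀ k ∈ rest.map (fun t => (t.1, t.2.1)),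
        k ≠ (((t.1, t.2.1, pvAShelf t.2.2) : Int × Int × List (List (String × Int))).1,
             ((t.1, t.2.1, pvAShelf t.2.2) : Int × Int × List (List (String × Int))).2.1) :=
      fun k hk hh => hnm (by rw [← hh] at *; exact hk)
    rw [pvFoldSkip _ _ _ hne, List.map_cons, ih htail]

-- ===== VERDICT (by name: the statement is the Claim_ definition above) =====
theorem sort_class_info_spec : Claim_equal_sort_class_info := by
  intro ci _ hpre
  unfold Spec_sort_class_info sort_class_info_alt
  rw [pvOuter ci hpre.1]
  exact List.map_congr_left fun t _ => by
    rw [pvAShelf_eq_canon, pvBShelf_eq_canon]
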